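-- pv_equiv track=rewrite | github.com/Wizzerinus/advent-of-code-2023 | day-18.py | find_space_within
-- ===== SOURCE A (Python) =====
-- def find_space_within(vectors):
--     total = 0
--     while len(vectors) >= 4:
--         first, second, after_second, before_first = vectors[0], vectors[1], vectors[2], vectors[-1]
--         total += first * second
--         new_first = first + after_second
--         new_second = second + before_first
--         vectors = [new_first, *vectors[3:-1], new_second]
--
--     return round(abs(total))
-- ===== SOURCE B (Python) =====
-- def find_space_within(vectors):
--     total = 0
--     prefix = 0
--     i = 0
--     n = len(vectors)
--     while i + 3 < n:
--         prefix += vectors[i]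
--         total += prefix * vectors[i + 1]
--         i += 2
--     return abs(total)
-- ===== Notes on version B (the rewrite author's own statement) =====
-- stated objective: faster
-- what changed: Replaced the while-loop that rebuilds a 2-shorter list each iteration (quadratic copying via slicing) with a single indexed pass keeping a running prefix sum of the even-indexed vectors and adding prefix*vectors[i+1] per pair.
import Mathlib
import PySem

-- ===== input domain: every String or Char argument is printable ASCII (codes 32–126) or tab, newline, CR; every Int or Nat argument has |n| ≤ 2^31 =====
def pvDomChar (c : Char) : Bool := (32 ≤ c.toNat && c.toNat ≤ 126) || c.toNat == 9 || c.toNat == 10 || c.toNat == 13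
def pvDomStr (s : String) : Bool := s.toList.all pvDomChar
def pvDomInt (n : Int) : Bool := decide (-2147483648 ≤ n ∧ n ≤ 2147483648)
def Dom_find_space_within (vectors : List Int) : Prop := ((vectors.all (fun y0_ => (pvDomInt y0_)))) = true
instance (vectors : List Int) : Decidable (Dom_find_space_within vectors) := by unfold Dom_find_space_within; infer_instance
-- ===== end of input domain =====

-- B replaces A's quadratic rebuild-the-list loop by a single pass keeping a running
-- prefix sum of even-indexed vectors; equal return value, no observable mutation.


-- ===== PORT A =====
-- the 'while len(vectors) >= 4' loop; the indexed reads are in range under the guard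
def find_space_within_loop (vectors : List Int) (total : Int) : Int :=
  if _h : 4 ≤ vectors.length then
    let first := PySem.List.pyGetD vectors 0 0
    let second := PySem.List.pyGetD vectors 1 0
    let after_second := PySem.List.pyGetD vectors 2 0
    let before_first := PySem.List.pyGetD vectors (-1) 0
    find_space_within_loop
      ((first + after_second) :: (PySem.List.slice vectors (some 3) (some (-1)) ++ [second + before_first]))
      (total + first * second)
  else total
termination_by vectors.length
decreasing_by
  simp only [List.length_cons, List.length_append, PySem.List.length_slice,
    PySem.List.clampIdx_neg_one, List.length_cons, List.length_nil]
  have : PySem.List.clampIdx vectors.length 3 = min 3 vectors.length := by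
    exact_mod_cast PySem.List.clampIdx_natCast vectors.length 3
  omega

-- round(abs(total)) on an int is |total|
def find_space_within (vectors : List Int) : Int :=
  |find_space_within_loop vectors 0|

-- ===== PORT B =====
-- the 'while i + 3 < n' loop of Source B
def find_space_within_alt_loop (vectors : List Int) (n i prefixSum total : Int) : Int :=
  if _h : i + 3 < n then
    find_space_within_alt_loop vectors n (i + 2) (prefixSum + PySem.List.pyGetD vectors i 0)
      (total + (prefixSum + PySem.List.pyGetD vectors i 0) * PySem.List.pyGetD vectors (i + 1) 0)
  else total
termination_by (n - i).toNat
decreasing_by omega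

def find_space_within_alt (vectors : List Int) : Int :=
  |find_space_within_alt_loop vectors vectors.length 0 0 0|

-- ===== PRECONDITION & SPEC =====
def Spec_find_space_within (vectors : List Int) (out : Int) : Prop := out = find_space_within_alt vectors
instance (vectors : List Int) (out : Int) : Decidable (Spec_find_space_within vectors out) := by unfold Spec_find_space_within; infer_instance

-- ===== CLAIM (what is proved, stated in full; the proofs are below) =====
def Claim_equal_find_space_within : Prop := ∀ (vectors : List Int), Dom_find_space_within vectors → Spec_find_space_within vectors (find_space_within vectors)

-- ===== LEMMAS AND PROOFS =====

/-- The common value both loops compute: fold over the pairs (v[2k], v[2k+1]) that still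
have at least two elements after them, accumulating the prefix sum `p` of even entries. -/
def pvSpair (p : Int) : List Int → Int
  | a :: b :: rest => if 2 ≤ rest.length then (p + a) * b + pvSpair (p + a) rest else 0
  | _ => 0

lemma pvSpair_small (p : Int) (l : List Int) (h : l.length ≤ 3) : pvSpair p l = 0 := by
  match l with
  | [] => simp [pvSpair]
  | [_] => simp [pvSpair]
  | a :: b :: rest =>
    simp only [List.length_cons] at h
    simp [pvSpair, if_neg (by omega : ¬ 2 ≤ rest.length)]

lemma pvSpair_shift (t : List Int) (p x y : Int) :
    pvSpair p ((x + y) :: t) = pvSpair (p + x) (y :: t) := by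
  cases t with
  | nil => simp [pvSpair]
  | cons b rest => simp [pvSpair, add_assoc]

lemma pvSpair_last : ∀ (L : List Int) (p x y : Int), pvSpair p (L ++ [x]) = pvSpair p (L ++ [y])
  | [], _, _, _ => by simp [pvSpair]
  | [_], _, _, _ => by simp [pvSpair]
  | a :: b :: L, p, x, y => by
    simp only [List.cons_append, pvSpair, List.length_append, List.length_cons, List.length_nil]
    rw [pvSpair_last L]

lemma loopA_eq (v : List Int) (t : Int) :
    find_space_within_loop v t = t + pvSpair 0 v := by
  by_cases h : 4 ≤ v.length
  · obtain ⟨a, b, c, d, r0, rfl⟩ : ∃ a b c d r0, v = a :: b :: c :: d :: r0 := by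
      match v, h with
      | a :: b :: c :: d :: r0, _ => exact ⟨a, b, c, d, r0, rfl⟩
    have hne : (d :: r0) ≠ [] := by simp
    have hz : (d :: r0).dropLast ++ [(d :: r0).getLast hne] = d :: r0 :=
      List.dropLast_concat_getLast hne
    have hslice : PySem.List.slice (a :: b :: c :: d :: r0) (some 3) (some (-1))
        = (d :: r0).dropLast := by
      simp [PySem.List.slice, List.dropLast_eq_take]
    have hlast : PySem.List.pyGetD (a :: b :: c :: d :: r0) (-1) 0 = (d :: r0).getLast hne := by
      rw [PySem.List.pyGetD_neg_one _ _ (by simp)]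
      simp [List.getLast_cons]
    have ga : (a :: b :: c :: d :: r0).getD 0 0 = a := rfl
    have gb : (a :: b :: c :: d :: r0).getD 1 0 = b := rfl
    have gc : (a :: b :: c :: d :: r0).getD 2 0 = c := rfl
    rw [find_space_within_loop, dif_pos h]
    simp only [hslice, hlast, PySem.List.pyGetD_ofNat', ga, gb, gc]
    rw [loopA_eq ((a + c) :: ((d :: r0).dropLast ++ [b + (d :: r0).getLast hne])) (t + a * b)]
    rw [pvSpair_shift, zero_add]
    rw [show (c : Int) :: ((d :: r0).dropLast ++ [b + (d :: r0).getLast hne])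
          = (c :: (d :: r0).dropLast) ++ [b + (d :: r0).getLast hne] by simp]
    rw [pvSpair_last (c :: (d :: r0).dropLast) a (b + (d :: r0).getLast hne) ((d :: r0).getLast hne)]
    conv_rhs => rw [show (d :: r0) = (d :: r0).dropLast ++ [(d :: r0).getLast hne] from hz.symm]
    have expand : pvSpair 0 (a :: b :: (c :: ((d :: r0).dropLast ++ [(d :: r0).getLast hne])))
        = (0 + a) * b + pvSpair (0 + a) (c :: ((d :: r0).dropLast ++ [(d :: r0).getLast hne])) := by
      rw [pvSpair, if_pos (by simp only [List.length_cons, List.length_append]; omega)]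
    simp only [List.cons_append] at expand ⊢
    rw [expand, zero_add]
    ring
  · rw [find_space_within_loop, dif_neg h, pvSpair_small 0 v (by omega)]
    ring
termination_by v.length
decreasing_by subst_vars; simp only [List.length_cons, List.length_append, List.length_dropLast, List.length_nil]; omega

lemma loopB_eq (v : List Int) (n i p t : Int) (hn : n = v.length) (hi : 0 ≤ i) :
    find_space_within_alt_loop v n i p t = t + pvSpair p (v.drop i.toNat) := by
  by_cases h : i + 3 < n
  · have hiN : i.toNat + 3 < v.length := by omega
    rw [find_space_within_alt_loop, dif_pos h]
    rw [loopB_eq v n (i + 2) _ _ hn (by omega)]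
    have g1 : PySem.List.pyGetD v i 0 = v[i.toNat]'(by omega) :=
      PySem.List.pyGetD_eq_getElem v 0 hi (by omega)
    have g2 : PySem.List.pyGetD v (i + 1) 0 = v[i.toNat + 1]'(by omega) := by
      rw [PySem.List.pyGetD_eq_getElem v 0 (by omega) (by omega)]
      simp only [show (i + 1).toNat = i.toNat + 1 from by omega]
    have e1 : v.drop i.toNat = v[i.toNat]'(by omega) :: v.drop (i.toNat + 1) :=
      List.drop_eq_getElem_cons (by omega)
    have e2 : v.drop (i.toNat + 1) = v[i.toNat + 1]'(by omega) :: v.drop (i.toNat + 2) :=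
      List.drop_eq_getElem_cons (by omega)
    rw [g1, g2, e1, e2, show (i + 2).toNat = i.toNat + 2 from by omega]
    have hc : 2 ≤ (v.drop (i.toNat + 2)).length := by
      simp [List.length_drop]; omega
    simp only [pvSpair, if_pos hc]
    ring
  · rw [find_space_within_alt_loop, dif_neg h]
    rw [pvSpair_small p _ (by simp [List.length_drop]; omega)]
    ring
termination_by (n - i).toNat
decreasing_by omega

-- ===== VERDICT (by name: the statement is the Claim_ definition above) =====
theorem find_space_within_spec : Claim_equal_find_space_within := by
  intro v _
  unfold Spec_find_space_within find_space_within find_space_within_alt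
  rw [loopA_eq, loopB_eq v _ 0 0 0 rfl (le_refl 0)]
  simp
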